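-- pv_equiv track=rewrite | github.com/UberMetroid/chrono-mcp | scripts/extract_comprehensive.py | find_strings_in_range
-- ===== SOURCE A (Python) =====
-- def find_strings_in_range(data, start, length, min_len=4):
--     """Find strings in a specific range"""
--     chunk = data[start:start+length]
--     results = []
--     current = []
--
--     for i, byte in enumerate(chunk):
--         if 32 <= byte <= 126:
--             current.append(chr(byte))
--         else:
--             if len(current) >= min_len:
--                 results.append((start + i - len(current), ''.join(current)))
--             current = []
--
--     if len(current) >= min_len:
--         results.append((start + length - len(current), ''.join(current)))
--
--     return results
-- ===== SOURCE B (Python) =====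
-- def find_strings_in_range(data, start, length, min_len=4):
--     """Find strings in a specific range (run-scanning two-pointer version)."""
--     chunk = data[start:start+length]
--     n = len(chunk)
--     results = []
--     i = 0
--     while i < n:
--         if 32 <= chunk[i] <= 126:
--             j = i + 1
--             while j < n and 32 <= chunk[j] <= 126:
--                 j += 1
--             if j - i >= min_len:
--                 results.append((start + i, ''.join(map(chr, chunk[i:j]))))
--             i = j
--         else:
--             i += 1
--     return results
-- ===== Notes on version B (the rewrite author's own statement) =====
-- stated objective: alternative
-- what changed: Replaces A's per-byte accumulator state machine (current buffer with two separate flush sites) by a two-pointer scan that locates each maximal printable run and emits it directly at its true offset, fixing the trailing-run offset when the slice is truncated.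
-- intended difference: When the chunk data[start:start+length] is shorter than length (slice truncated by the end of data) and ends in a printable run of length >= min_len, A reports that trailing string at offset start+length-len(run), which lies past the actual data, while B reports its true position start+run_start, the intended value. — e.g. on find_strings_in_range([65, 66, 67, 68], 0, 10, 4): A returns [(6, "ABCD")], B returns [(0, "ABCD")]
-- outside the precondition, e.g. on find_strings_in_range([0, 65], 0, 2, 0): A returns [(0, ''), (1, 'A')], B returns [(1, 'A')]
import Mathlib
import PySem

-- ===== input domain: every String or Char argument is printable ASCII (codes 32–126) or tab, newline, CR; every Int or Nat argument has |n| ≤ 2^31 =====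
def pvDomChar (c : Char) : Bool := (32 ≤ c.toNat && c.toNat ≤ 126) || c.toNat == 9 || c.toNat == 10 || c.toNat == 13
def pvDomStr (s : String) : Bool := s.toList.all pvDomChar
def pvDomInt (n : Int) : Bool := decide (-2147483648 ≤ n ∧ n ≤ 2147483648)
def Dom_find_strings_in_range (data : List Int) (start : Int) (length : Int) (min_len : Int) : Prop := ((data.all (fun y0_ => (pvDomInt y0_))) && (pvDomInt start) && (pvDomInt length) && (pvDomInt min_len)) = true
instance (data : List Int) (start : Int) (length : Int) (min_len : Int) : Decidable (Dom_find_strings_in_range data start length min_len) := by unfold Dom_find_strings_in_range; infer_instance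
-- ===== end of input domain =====

-- B replaces A's per-byte accumulator state machine (with its two flush sites) by a two-pointer
-- scan that emits each maximal printable run directly at its true offset; equivalence is about the
-- return value only, and B intentionally reports the correct offset for a trailing run when the
-- slice is truncated (see D_ below).

-- shared tiny helper: "32 <= byte <= 126"
def pvPrint (b : Int) : Bool := decide (32 ≤ b ∧ b ≤ 126)

-- ===== PORT A =====
-- loop body of A's 'for i, byte in enumerate(chunk)' (state = (results, current))
def aStep (start min_len : Int) (acc : List (Int × String) × List Char) (p : Int × Int) :
    List (Int × String) × List Char :=
  if pvPrint p.2 then (acc.1, acc.2 ++ [Char.ofNat p.2.toNat])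
  else if min_len ≤ (acc.2.length : Int) then
    (acc.1 ++ [(start + p.1 - acc.2.length, String.ofList acc.2)], [])
  else (acc.1, [])

def find_strings_in_range (data : List Int) (start : Int) (length : Int) (min_len : Int) :
    List (Int × String) :=
  let chunk := PySem.List.slice data (some start) (some (start + length))
  let st := (PySem.List.enumerate chunk 0).foldl (aStep start min_len) ([], [])
  if min_len ≤ (st.2.length : Int) then
    st.1 ++ [(start + length - st.2.length, String.ofList st.2)]
  else st.1

-- ===== PORT B =====
-- B's outer 'while i < n' (i is the absolute index of the list's head inside the chunk);
-- the inner 'while j < n and printable' is the maximal printable run = takeWhile/dropWhile.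
def altLoop (start min_len : Int) (i : Int) : List Int → List (Int × String)
  | [] => []
  | b :: t =>
    if pvPrint b then
      let run := b :: t.takeWhile pvPrint
      (if min_len ≤ (run.length : Int) then
        [(start + i, String.ofList (run.map (fun x => Char.ofNat x.toNat)))]
       else []) ++ altLoop start min_len (i + run.length) (t.dropWhile pvPrint)
    else altLoop start min_len (i + 1) t
  termination_by l => l.length
  decreasing_by
  · exact Nat.lt_succ_of_le (List.length_dropWhile_le pvPrint t)
  · simp

def find_strings_in_range_alt (data : List Int) (start : Int) (length : Int) (min_len : Int) :
    List (Int × String) :=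
  altLoop start min_len 0 (PySem.List.slice data (some start) (some (start + length)))

-- ===== PRECONDITION & SPEC =====
-- Pre_ excludes min_len <= 0, the degenerate corner where A also emits an empty-string result at
-- every non-printable byte and at the end of the chunk, while B naturally reports only actual runs.
def Pre_find_strings_in_range (data : List Int) (start : Int) (length : Int) (min_len : Int) : Prop :=
  1 ≤ min_len
instance (data : List Int) (start : Int) (length : Int) (min_len : Int) :
    Decidable (Pre_find_strings_in_range data start length min_len) := by
  unfold Pre_find_strings_in_range; infer_instance

def pvWitness_find_strings_in_range : List Int × Int × Int × Int := ([72, 105, 33, 0], 0, 4, 1)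

-- the maximal printable run at the end of a chunk
def trailRun (c : List Int) : List Int :=
  (c.reverse.takeWhile (fun b => decide (32 ≤ b ∧ b ≤ 126))).reverse

-- On inputs whose chunk ends in a qualifying printable run but is cut short by the slice
-- (len(data[start:start+length]) != length), A reports that trailing string at the wrong offset
-- start+length-len(run) (past the data), while B reports its true position start+run_start,
-- which is the intended value.
def D_find_strings_in_range (data : List Int) (start : Int) (length : Int) (min_len : Int) : Prop :=
  min_len ≤ ((trailRun (PySem.List.slice data (some start) (some (start + length)))).length : Int) ∧
  (((PySem.List.clampIdx data.length (start + length) - PySem.List.clampIdx data.length start : Nat) : Int) ≠ length)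
instance (data : List Int) (start : Int) (length : Int) (min_len : Int) :
    Decidable (D_find_strings_in_range data start length min_len) := by
  unfold D_find_strings_in_range; infer_instance

def Spec_find_strings_in_range (data : List Int) (start : Int) (length : Int) (min_len : Int)
    (out : List (Int × String)) : Prop :=
  ¬ D_find_strings_in_range data start length min_len →
    out = find_strings_in_range_alt data start length min_len
instance (data : List Int) (start : Int) (length : Int) (min_len : Int)
    (out : List (Int × String)) : Decidable (Spec_find_strings_in_range data start length min_len out) := by
  unfold Spec_find_strings_in_range; infer_instance

def pvDiffWitness_find_strings_in_range : List Int × Int × Int × Int := ([65, 66, 67, 68], 0, 10, 4)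
def pvDiffWitnessOut_find_strings_in_range : (List (Int × String)) × (List (Int × String)) :=
  ([(6, "ABCD")], [(0, "ABCD")])

-- ===== CLAIM (what is proved, stated in full; the proofs are below) =====
def Claim_unchanged_find_strings_in_range : Prop := ∀ (data : List Int) (start : Int) (length : Int) (min_len : Int), Dom_find_strings_in_range data start length min_len → Pre_find_strings_in_range data start length min_len → Spec_find_strings_in_range data start length min_len (find_strings_in_range data start length min_len)
def Claim_changed_find_strings_in_range : Prop := Dom_find_strings_in_range (pvDiffWitness_find_strings_in_range.1) (pvDiffWitness_find_strings_in_range.2.1) (pvDiffWitness_find_strings_in_range.2.2.1) (pvDiffWitness_find_strings_in_range.2.2.2) ∧ Pre_find_strings_in_range (pvDiffWitness_find_strings_in_range.1) (pvDiffWitness_find_strings_in_range.2.1) (pvDiffWitness_find_strings_in_range.2.2.1) (pvDiffWitness_find_strings_in_range.2.2.2) ∧ D_find_strings_in_range (pvDiffWitness_find_strings_in_range.1) (pvDiffWitness_find_strings_in_range.2.1) (pvDiffWitness_find_strings_in_range.2.2.1) (pvDiffWitness_find_strings_in_range.2.2.2) ∧ find_strings_in_range (pvDiffWitness_find_strings_in_range.1)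 (pvDiffWitness_find_strings_in_range.2.1) (pvDiffWitness_find_strings_in_range.2.2.1) (pvDiffWitness_find_strings_in_range.2.2.2) = pvDiffWitnessOut_find_strings_in_range.1 ∧ find_strings_in_range_alt (pvDiffWitness_find_strings_in_range.1) (pvDiffWitness_find_strings_in_range.2.1) (pvDiffWitness_find_strings_in_range.2.2.1) (pvDiffWitness_find_strings_in_range.2.2.2) = pvDiffWitnessOut_find_strings_in_range.2 ∧ pvDiffWitnessOut_find_strings_in_range.1 ≠ pvDiffWitnessOut_find_strings_in_range.2
def Claim_exact_find_strings_in_range : Prop := ∀ (data : List Int) (start : Int) (length : Int) (min_len : Int), Dom_find_strings_in_range data start length min_len → Pre_find_strings_in_range data start length min_len → D_find_strings_in_range data start length min_len → find_strings_in_range data start length min_len ≠ find_strings_in_range_alt data start length min_len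

-- ===== LEMMAS AND PROOFS =====
-- a non-printable byte anywhere cuts the trailing run down to what follows it
theorem trailRun_eq_pvPrint (c : List Int) :
    trailRun c = (c.reverse.takeWhile pvPrint).reverse := rfl

theorem trailRun_append_cons (l t : List Int) (b : Int) (hb : pvPrint b = false) :
    trailRun (l ++ b :: t) = trailRun t := by
  rw [trailRun_eq_pvPrint, trailRun_eq_pvPrint]
  rw [List.reverse_append, List.reverse_cons, List.append_assoc, List.takeWhile_append]
  split_ifs with h
  · have h2 : List.takeWhile pvPrint t.reverse = t.reverse :=
      (List.takeWhile_prefix (p := pvPrint)).eq_of_length h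
    simp [hb, h2]
  · rfl

theorem trailRun_cons_of_not (b : Int) (t : List Int) (hb : pvPrint b = false) :
    trailRun (b :: t) = trailRun t :=
  trailRun_append_cons [] t b hb

theorem trailRun_of_all (c : List Int) (h : ∀ x ∈ c, pvPrint x = true) :
    trailRun c = c := by
  rw [trailRun_eq_pvPrint]
  rw [List.takeWhile_eq_self_iff.mpr (by intro x hx; exact h x (by simpa using hx))]
  simp

theorem altLoop_cons_neg (s m i b : Int) (t : List Int) (hb : pvPrint b = false) :
    altLoop s m i (b :: t) = altLoop s m (i + 1) t := by
  rw [altLoop, if_neg (by simp [hb])]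

-- A's fold absorbs a printable run into 'current'
theorem fold_absorb (start min_len : Int) (run : List Int)
    (h : ∀ x ∈ run, pvPrint x = true) :
    ∀ (rest : List Int) (i : Int) (res : List (Int × String)) (cur : List Char),
    (PySem.List.enumerate (run ++ rest) i).foldl (aStep start min_len) (res, cur) =
    (PySem.List.enumerate rest (i + run.length)).foldl (aStep start min_len)
      (res, cur ++ run.map (fun x => Char.ofNat x.toNat)) := by
  induction run with
  | nil => intro rest i res cur; simp
  | cons b r ih =>
    intro rest i res cur
    have hb : pvPrint b = true := h b (by simp)
    rw [List.cons_append, PySem.List.enumerate_cons, List.foldl_cons]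
    have hstep : aStep start min_len (res, cur) (i, b) = (res, cur ++ [Char.ofNat b.toNat]) := by
      simp [aStep, hb]
    rw [hstep, ih (fun x hx => h x (by simp [hx]))]
    have hidx : i + 1 + (r.length : Int) = i + ((b :: r).length : Int) := by
      simp; ring
    rw [hidx]
    simp

-- main characterisation: A's fold from a fresh 'current' vs B's run scan
theorem fsr_main (start min_len : Int) (hm : 1 ≤ min_len) :
    ∀ (n : Nat) (c : List Int), c.length = n → ∀ (i : Int) (res : List (Int × String)),
    ∃ X : List (Int × String),
      (PySem.List.enumerate c i).foldl (aStep start min_len) (res, []) =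
        (res ++ X, (trailRun c).map (fun x => Char.ofNat x.toNat)) ∧
      altLoop start min_len i c =
        X ++ (if min_len ≤ ((trailRun c).length : Int) then
          [(start + i + c.length - (trailRun c).length, String.ofList ((trailRun c).map (fun x => Char.ofNat x.toNat)))]
         else []) := by
  intro n
  induction n using Nat.strong_induction_on with
  | _ n IH =>
    intro c hc i res
    match c with
    | [] =>
      refine ⟨[], ?_, ?_⟩
      · simp [trailRun]
      · rw [altLoop]
        simp [trailRun]
        omega
    | b :: cs =>
      by_cases hb : pvPrint b = true
      · -- printable head: split off the maximal printable run
        have hsplit : cs.takeWhile pvPrint ++ cs.dropWhile pvPrint = cs :=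
          List.takeWhile_append_dropWhile
        have hallrun : ∀ x ∈ b :: cs.takeWhile pvPrint, pvPrint x = true := by
          intro x hx
          rcases List.mem_cons.mp hx with h | h
          · rw [h]; exact hb
          · exact List.mem_takeWhile_imp h
        cases hrest2 : cs.dropWhile pvPrint with
        | nil =>
          -- the whole chunk is one printable run
          have hcs : cs.takeWhile pvPrint = cs := by
            rw [hrest2, List.append_nil] at hsplit; exact hsplit
          have hall : ∀ x ∈ b :: cs, pvPrint x = true := by rw [← hcs]; exact hallrun
          have htr : trailRun (b :: cs) = b :: cs := trailRun_of_all _ hall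
          refine ⟨[], ?_, ?_⟩
          · have := fold_absorb start min_len (b :: cs) hall [] i res []
            simpa [htr] using this
          · rw [altLoop, if_pos hb, hrest2]
            simp only [altLoop, hcs, htr, List.append_nil, List.nil_append]
            have : start + i + ((b :: cs).length : Int) - ((b :: cs).length : Int) = start + i := by
              ring
            rw [this]
        | cons b' t' =>
          have hb' : pvPrint b' = false := by
            have hne : cs.dropWhile pvPrint ≠ [] := by rw [hrest2]; simp
            have := List.head_dropWhile_not pvPrint hne
            simpa [hrest2] using this
          have hcs : cs = cs.takeWhile pvPrint ++ b' :: t' := by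
            conv_lhs => rw [← hsplit, hrest2]
          have hlt : t'.length < n := by
            rw [← hc, hcs]
            simp
            omega
          obtain ⟨X', h1, h2⟩ := IH t'.length hlt t' rfl
            (i + ((b :: cs.takeWhile pvPrint).length : Int) + 1)
            (res ++ (if min_len ≤ (((b :: cs.takeWhile pvPrint).length : Nat) : Int) then
              [(start + i, String.ofList ((b :: cs.takeWhile pvPrint).map (fun x => Char.ofNat x.toNat)))] else []))
          have hsplit' : b :: cs = (b :: cs.takeWhile pvPrint) ++ b' :: t' := by
            rw [List.cons_append, ← hcs]
          have htr2 : trailRun (b :: List.takeWhile pvPrint cs ++ b' :: t') = trailRun t' := by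
            exact trailRun_append_cons (b :: List.takeWhile pvPrint cs) t' b' hb'
          have htr : trailRun (b :: cs) = trailRun t' := by rw [hsplit']; exact htr2
          refine ⟨(if min_len ≤ (((b :: cs.takeWhile pvPrint).length : Nat) : Int) then
              [(start + i, String.ofList ((b :: cs.takeWhile pvPrint).map (fun x => Char.ofNat x.toNat)))] else []) ++ X', ?_, ?_⟩
          · rw [hsplit', fold_absorb start min_len (b :: cs.takeWhile pvPrint) hallrun (b' :: t') i res []]
            rw [PySem.List.enumerate_cons, List.foldl_cons]
            have hstep2 : aStep start min_len (res, [] ++ (b :: cs.takeWhile pvPrint).map (fun x => Char.ofNat x.toNat))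
                (i + ((b :: cs.takeWhile pvPrint).length : Int), b') =
                (res ++ (if min_len ≤ (((b :: cs.takeWhile pvPrint).length : Nat) : Int) then
                  [(start + i, String.ofList ((b :: cs.takeWhile pvPrint).map (fun x => Char.ofNat x.toNat)))] else []), []) := by
              simp only [aStep, hb', List.nil_append, Bool.false_eq_true, if_false, List.length_map]
              split_ifs with hq
              · have harith : start + (i + ((b :: cs.takeWhile pvPrint).length : Int)) -
                    (((b :: cs.takeWhile pvPrint).length : Nat) : Int) = start + i := by ring
                rw [harith]
              · simp
            rw [hstep2, h1, htr2, List.append_assoc]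
          · rw [altLoop, if_pos hb]
            dsimp only
            rw [hrest2, altLoop_cons_neg _ _ _ _ _ hb', h2, htr]
            have hlenN : cs.length = (cs.takeWhile pvPrint).length + 1 + t'.length := by
              conv_lhs => rw [hcs]
              simp [List.length_append]
              omega
            have hidx : start + (i + ((b :: cs.takeWhile pvPrint).length : Int) + 1) + (t'.length : Int) =
                start + i + ((b :: cs).length : Int) := by
              simp only [List.length_cons]
              push_cast
              omega
            rw [hidx, List.append_assoc]
      · -- non-printable head
        have hb' : pvPrint b = false := by simpa using hb
        obtain ⟨X, h1, h2⟩ := IH cs.length (by simp [← hc]) cs rfl (i + 1) res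
        have htr : trailRun (b :: cs) = trailRun cs := trailRun_cons_of_not b cs hb'
        refine ⟨X, ?_, ?_⟩
        · rw [PySem.List.enumerate_cons, List.foldl_cons]
          have hstep : aStep start min_len (res, []) (i, b) = (res, []) := by
            simp [aStep, hb']
            omega
          rw [hstep, h1, htr]
        · rw [altLoop_cons_neg _ _ _ _ _ hb', h2, htr]
          have hidx : start + (i + 1) + (cs.length : Int) = start + i + ((b :: cs).length : Int) := by
            simp; ring
          rw [hidx]

-- both ports written through the characterisation of fsr_main on the common chunk
theorem fsr_both (data : List Int) (start length min_len : Int) (hm : 1 ≤ min_len) :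
    ∃ X : List (Int × String),
      find_strings_in_range data start length min_len =
        (if min_len ≤ ((trailRun (PySem.List.slice data (some start) (some (start + length)))).length : Int) then
          X ++ [(start + length - ((trailRun (PySem.List.slice data (some start) (some (start + length)))).length : Int),
            String.ofList ((trailRun (PySem.List.slice data (some start) (some (start + length)))).map (fun x => Char.ofNat x.toNat)))]
         else X) ∧
      find_strings_in_range_alt data start length min_len =
        X ++ (if min_len ≤ ((trailRun (PySem.List.slice data (some start) (some (start + length)))).length : Int) then
          [(start + ((PySem.List.slice data (some start) (some (start + length))).length : Int) -
              ((trailRun (PySem.List.slice data (some start) (some (start + length)))).length : Int),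
            String.ofList ((trailRun (PySem.List.slice data (some start) (some (start + length)))).map (fun x => Char.ofNat x.toNat)))]
         else []) := by
  obtain ⟨X, h1, h2⟩ := fsr_main start min_len hm
    (PySem.List.slice data (some start) (some (start + length))).length
    (PySem.List.slice data (some start) (some (start + length))) rfl 0 []
  refine ⟨X, ?_, ?_⟩
  · simp only [find_strings_in_range]
    rw [h1]
    simp only [List.nil_append, List.length_map]
  · simp only [find_strings_in_range_alt]
    rw [h2]
    congr 1
    split_ifs with hq
    · have harith : start + 0 + ((PySem.List.slice data (some start) (some (start + length))).length : Int) -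
          ((trailRun (PySem.List.slice data (some start) (some (start + length)))).length : Int) =
          start + ((PySem.List.slice data (some start) (some (start + length))).length : Int) -
          ((trailRun (PySem.List.slice data (some start) (some (start + length)))).length : Int) := by ring
      rw [harith]
    · rfl

-- ===== VERDICT (by name: the statement is the Claim_ definition above) =====
theorem find_strings_in_range_spec : Claim_unchanged_find_strings_in_range := by
  intro data start length min_len _hD hpre hnd
  obtain ⟨X, h1, h2⟩ := fsr_both data start length min_len hpre
  rw [h1, h2]
  unfold D_find_strings_in_range at hnd
  split_ifs with hq
  · have hlen : ((PySem.List.slice data (some start) (some (start + length))).length : Int) = length := by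
      by_contra hne
      rw [PySem.List.length_slice] at hne
      exact hnd ⟨hq, hne⟩
    rw [hlen]
  · simp

theorem find_strings_in_range_changed : Claim_changed_find_strings_in_range := by
  unfold Claim_changed_find_strings_in_range
  refine ⟨by decide, by decide, by decide, by decide, ?_, by decide⟩
  show find_strings_in_range_alt [65, 66, 67, 68] 0 10 4 = [(0, "ABCD")]
  rw [find_strings_in_range_alt]
  norm_num [altLoop, pvPrint, PySem.List.slice, PySem.List.clampIdx]
  decide

theorem find_strings_in_range_tight : Claim_exact_find_strings_in_range := by
  intro data start length min_len _hD hpre hd heq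
  obtain ⟨X, h1, h2⟩ := fsr_both data start length min_len hpre
  obtain ⟨hq, hne⟩ := hd
  rw [← PySem.List.length_slice (xs := data) (a := start) (b := start + length)] at hne
  rw [h1, h2, if_pos hq, if_pos hq] at heq
  have := List.append_cancel_left heq
  have hfst : start + length - ((trailRun (PySem.List.slice data (some start) (some (start + length)))).length : Int) =
      start + ((PySem.List.slice data (some start) (some (start + length))).length : Int) -
        ((trailRun (PySem.List.slice data (some start) (some (start + length)))).length : Int) := by
    have := List.head_eq_of_cons_eq this
    exact congrArg Prod.fst this
  omega
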